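-- pv_equiv track=rewrite | github.com/PhilippeMalric/RNASS_v2 | RNASS.py | extractMotif
-- ===== SOURCE A (Python) =====
-- import itertools
-- import itertools
--
-- def extractMotif(n,seq):
--     alphabets = ['A', 'C', 'U', 'G']
--     keywords = itertools.product(alphabets, repeat = n)
--     tab = ["".join(x) for x in keywords ]
--     d_temp = {}
--     for e in tab:
--         d_temp[e] = seq.count(e)
--     return d_temp
-- ===== SOURCE B (Python) =====
-- def _keys(n):
--     # all length-n motifs in itertools.product order (A,C,U,G; leftmost varies slowest)
--     out = [""]
--     for _ in range(n):
--         out = [c + t for c in "ACUG" for t in out]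
--     return out
--
-- def extractMotif(n, seq):
--     m = len(seq)
--     pos = {}
--     for j in range(m - n + 1):
--         pos.setdefault(seq[j:j+n], []).append(j)
--     d = {}
--     for t in _keys(n):
--         cnt = 0
--         last = 0
--         for j in pos.get(t, []):
--             if last <= j:
--                 cnt += 1
--                 last = j + n
--         d[t] = cnt
--     return d
-- ===== Notes on version B (the rewrite author's own statement) =====
-- stated objective: alternative
-- what changed: Instead of calling seq.count once per each of the 4^n motifs, B scans seq once recording the positions of every length-n window in a dict, then computes each motif's non-overlapping count by a greedy pass over its recorded positions (missing motifs get 0).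
import Mathlib
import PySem

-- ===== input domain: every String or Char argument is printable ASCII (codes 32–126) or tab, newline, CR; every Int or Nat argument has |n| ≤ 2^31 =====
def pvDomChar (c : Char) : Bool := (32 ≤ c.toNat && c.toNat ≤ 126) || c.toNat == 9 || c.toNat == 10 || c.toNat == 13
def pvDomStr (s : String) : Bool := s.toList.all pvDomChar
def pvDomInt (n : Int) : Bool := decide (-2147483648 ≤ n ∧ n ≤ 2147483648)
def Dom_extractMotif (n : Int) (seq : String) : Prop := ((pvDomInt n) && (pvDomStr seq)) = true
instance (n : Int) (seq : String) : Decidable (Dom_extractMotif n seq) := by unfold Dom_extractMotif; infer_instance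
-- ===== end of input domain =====

-- B replaces A's per-motif seq.count scan (one scan of seq for each of the 4^n motifs) by one
-- single pass that records every length-n window's positions, then a greedy non-overlapping count
-- per motif from its position list; objective: alternative algorithm, same observable behaviour.


-- ===== PORT A =====
-- itertools.product(alphabets, repeat=n): leftmost component varies slowest
def pvProductRepeat (alph : List String) (k : Nat) : List (List String) :=
  match k with
  | 0 => [[]]
  | Nat.succ k' => alph.flatMap (fun a => (pvProductRepeat alph k').map (fun t => a :: t))

def extractMotif (n : Int) (seq : String) : List (String × Int) :=
  let alphabets : List String := ["A", "C", "U", "G"]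
  let tab := (pvProductRepeat alphabets n.toNat).map (fun x => PySem.Str.join "" x)
  (tab.foldl (fun d e => d.insert e ((PySem.Str.count seq e : Int))) PySem.Dict.empty).items

-- ===== PORT B =====
-- _keys(n): out = [""] ; n times: out = [c + t for c in "ACUG" for t in out]
def pvKeys (k : Nat) : List String :=
  (List.range k).foldl
    (fun out _ => ("ACUG".toList).flatMap (fun c => out.map (fun t => String.ofList [c] ++ t)))
    [""]

def extractMotif_alt (n : Int) (seq : String) : List (String × Int) :=
  let m : Int := PySem.Str.len seq
  let pos := (PySem.List.pyRange 0 (m - n + 1) 1).foldl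
      (fun d j => d.modify (PySem.Str.slice seq (some j) (some (j + n))) [] (fun l => l ++ [j]))
      (PySem.Dict.empty : PySem.Dict String (List Int))
  ((pvKeys n.toNat).foldl
    (fun d t => d.insert t
      (((pos.getD t []).foldl
          (fun (st : Int × Int) j => if st.2 ≤ j then (st.1 + 1, j + n) else st) (0, 0)).1))
    PySem.Dict.empty).items

-- ===== PRECONDITION & SPEC =====
-- Pre_ excludes exactly n < 0, where Python A raises ValueError (itertools.product with negative repeat)
def Pre_extractMotif (n : Int) (_seq : String) : Prop := 0 ≤ n
instance (n : Int) (seq : String) : Decidable (Pre_extractMotif n seq) := by unfold Pre_extractMotif; infer_instance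
def pvWitness_extractMotif : Int × String := (2, "ACUGGA")

def Spec_extractMotif (n : Int) (seq : String) (out : List (String × Int)) : Prop := out = extractMotif_alt n seq
instance (n : Int) (seq : String) (out : List (String × Int)) : Decidable (Spec_extractMotif n seq out) := by unfold Spec_extractMotif; infer_instance

-- ===== CLAIM (what is proved, stated in full; the proofs are below) =====
def Claim_equal_extractMotif : Prop := ∀ (n : Int) (seq : String), Dom_extractMotif n seq → Pre_extractMotif n seq → Spec_extractMotif n seq (extractMotif n seq)

-- ===== LEMMAS AND PROOFS =====
def cKeys : Nat → List (List Char)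
  | 0 => [[]]
  | Nat.succ k => (['A','C','U','G'] : List Char).flatMap (fun c => (cKeys k).map (fun t => c :: t))

theorem pvKeys_eq (k : Nat) : pvKeys k = (cKeys k).map String.ofList := by
  induction k with
  | zero => simp [pvKeys, cKeys]
  | succ k ih =>
    have step : pvKeys (k+1) = ("ACUG".toList).flatMap (fun c => (pvKeys k).map (fun t => String.ofList [c] ++ t)) := by
      unfold pvKeys; rw [List.range_succ, List.foldl_append]; rfl
    rw [step, ih, show "ACUG".toList = (['A','C','U','G'] : List Char) from rfl]
    simp only [cKeys, List.flatMap_cons, List.flatMap_nil, List.append_nil, List.map_map, Function.comp_def]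
    simp only [List.map_append, List.map_map, Function.comp_def]
    refine congrArg₂ (· ++ ·) ?_ (congrArg₂ (· ++ ·) ?_ (congrArg₂ (· ++ ·) ?_ ?_)) <;>
      exact List.map_congr_left (fun x _ => by rw [← String.toList_inj]; simp)

theorem prodRepeat_eq (k : Nat) :
    pvProductRepeat ["A","C","U","G"] k
      = (cKeys k).map (fun cl => cl.map (fun c => String.ofList [c])) := by
  induction k with
  | zero => rfl
  | succ k ih =>
    show (["A","C","U","G"] : List String).flatMap _ = _
    rw [ih, show (["A","C","U","G"] : List String) = (['A','C','U','G'] : List Char).map (fun c => String.ofList [c]) from rfl,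
       List.flatMap_map]
    simp [cKeys, List.map_map, Function.comp_def]

theorem join_singletons (cl : List Char) :
    PySem.Str.join "" (cl.map (fun c => String.ofList [c])) = String.ofList cl := by
  rw [← String.toList_inj]
  simp [PySem.Str.join, List.map_map, Function.comp_def]

theorem tab_eq (k : Nat) :
    (pvProductRepeat ["A","C","U","G"] k).map (fun x => PySem.Str.join "" x)
      = (cKeys k).map String.ofList := by
  rw [prodRepeat_eq, List.map_map]
  exact List.map_congr_left (fun cl _ => join_singletons cl)

theorem length_mem_cKeys {k : Nat} : ∀ {l : List Char}, l ∈ cKeys k → l.length = k := by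
  induction k with
  | zero => intro l h; simp [cKeys] at h; simp [h]
  | succ k ih =>
    intro l h
    simp only [cKeys, List.mem_flatMap, List.mem_map] at h
    obtain ⟨c, _, t, ht, rfl⟩ := h
    simp [ih ht]

theorem disj_cons {c c' : Char} (h : c ≠ c') (X Y : List (List Char)) :
    List.Disjoint (X.map (fun t => c :: t)) (Y.map (fun t => c' :: t)) := by
  intro a ha ha'
  simp only [List.mem_map] at ha ha'
  obtain ⟨t, _, rfl⟩ := ha
  obtain ⟨t', _, heq⟩ := ha'
  exact h (List.cons_eq_cons.1 heq.symm).1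

theorem nodup_cKeys (k : Nat) : (cKeys k).Nodup := by
  induction k with
  | zero => simp [cKeys]
  | succ k ih =>
    simp only [cKeys]
    rw [List.nodup_flatMap]
    constructor
    · intro c _
      exact ih.map (List.cons_injective)
    · refine List.pairwise_iff_forall_sublist.2 ?_
      intro c c' hsub
      have : c ≠ c' := by
        have : List.Pairwise (· ≠ ·) (['A','C','U','G'] : List Char) := by decide
        exact (List.pairwise_iff_forall_sublist.1 this) hsub
      exact disj_cons this _ _

def Gg (nn : Nat) : List Nat → Nat → Nat
  | [], _ => 0
  | j :: rest, last => if last ≤ j then 1 + Gg nn rest (j + nn) else Gg nn rest last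

theorem Gg_zero_of_lt (nn : Nat) (ps : List Nat) : ∀ (last : Nat), (∀ j ∈ ps, j < last) →
    Gg nn ps last = 0 := by
  induction ps with
  | nil => intro last h; rfl
  | cons j rest ih =>
    intro last h
    have hj := h j (by simp)
    simp [Gg, Nat.not_le.2 hj]
    exact ih last (fun x hx => h x (by simp [hx]))

theorem Gg_skip (nn : Nat) (ps : List Nat) : ∀ (i : Nat), i ∉ ps →
    Gg nn ps i = Gg nn ps (i + 1) := by
  induction ps with
  | nil => intro i h; rfl
  | cons j rest ih =>
    intro i h
    have hij : i ≠ j := by simp at h; tauto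
    have hrest : i ∉ rest := by simp at h; tauto
    by_cases hle : i ≤ j
    · have : i + 1 ≤ j := by omega
      simp [Gg, hle, this]
    · simp [Gg, hle, show ¬ i + 1 ≤ j by omega]
      exact ih i hrest

theorem Gg_mem (nn : Nat) (hnn : 1 ≤ nn) (ps : List Nat) : ∀ (i : Nat),
    ps.Pairwise (· < ·) → i ∈ ps →
    Gg nn ps i = 1 + Gg nn ps (i + nn) := by
  induction ps with
  | nil => intro i _ h; simp at h
  | cons j rest ih =>
    intro i hasc h
    rcases List.mem_cons.1 h with rfl | hmem
    · simp [Gg, show ¬ i + nn ≤ i by omega]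
    · have hji : j < i := (List.pairwise_cons.1 hasc).1 i hmem
      simp [Gg, show ¬ i ≤ j by omega, show ¬ i + nn ≤ j by omega]
      exact ih i (List.pairwise_cons.1 hasc).2 hmem

theorem Gg_all (ps : List Nat) (hasc : ps.Pairwise (· ≤ ·)) :
    ∀ last, (∀ j ∈ ps, last ≤ j) → Gg 0 ps last = ps.length := by
  induction ps with
  | nil => intro last _; rfl
  | cons j rest ih =>
    intro last h
    simp [Gg, h j (by simp)]
    rw [ih (List.pairwise_cons.1 hasc).2 j (List.pairwise_cons.1 hasc).1]
    omega

def PSpos (s tl : List Char) : List Nat :=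
  (List.range (s.length - tl.length + 1)).filter (fun j => tl.isPrefixOf (s.drop j))
theorem go_step (tl : List Char) (l : List Char) (h : l ≠ []) (f acc : Nat) :
    PySem.Chars.count.go tl (f+1) l acc =
      if tl.isPrefixOf l then PySem.Chars.count.go tl f (l.drop tl.length) (acc+1)
      else PySem.Chars.count.go tl f l.tail acc := by
  match l with
  | [] => simp at h
  | h1 :: t => rw [PySem.Chars.count.go]; rfl

theorem pairwise_PSpos (s tl : List Char) : (PSpos s tl).Pairwise (· < ·) :=
  (List.pairwise_lt_range).sublist (List.filter_sublist)

theorem mem_PSpos_bound {s tl : List Char} (hne : tl ≠ []) {j : Nat} (h : j ∈ PSpos s tl) :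
    j + tl.length ≤ s.length := by
  have h2 := (List.mem_filter.1 h).2
  have hpre := List.isPrefixOf_iff_prefix.1 h2
  have hlen := hpre.length_le
  simp only [List.length_drop] at hlen
  have : tl.length ≠ 0 := by simpa using hne
  omega

theorem count_go_eq (s tl : List Char) (hne : tl ≠ []) :
    ∀ (f i acc : Nat), s.length - i ≤ f →
      PySem.Chars.count.go tl f (s.drop i) acc = acc + Gg tl.length (PSpos s tl) i := by
  have hzero : ∀ i, s.length ≤ i → Gg tl.length (PSpos s tl) i = 0 := by
    intro i hi
    refine Gg_zero_of_lt _ _ i (fun j hj => ?_)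
    have := mem_PSpos_bound hne hj
    have : tl.length ≠ 0 := by simpa using hne
    omega
  intro f
  induction f with
  | zero =>
    intro i acc h
    have hle : s.length ≤ i := by omega
    rw [List.drop_eq_nil_of_le hle, PySem.Chars.count.go, hzero i hle]
    omega
  | succ f ih =>
    intro i acc h
    by_cases hlen : s.length ≤ i
    · rw [List.drop_eq_nil_of_le hlen, PySem.Chars.count.go, hzero i hlen]
      all_goals omega
    · rw [Nat.not_le] at hlen
      have hdne : s.drop i ≠ [] := by
        simp [List.drop_eq_nil_iff]; omega
      rw [go_step tl _ hdne]
      by_cases hp : tl.isPrefixOf (s.drop i)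
      · rw [if_pos hp]
        have hpre := List.isPrefixOf_iff_prefix.1 hp
        have hbound : i + tl.length ≤ s.length := by
          have := hpre.length_le
          simp only [List.length_drop] at this
          have : tl.length ≠ 0 := by simpa using hne
          omega
        have hmem : i ∈ PSpos s tl := by
          refine List.mem_filter.2 ⟨List.mem_range.2 ?_, hp⟩
          have : tl.length ≠ 0 := by simpa using hne
          omega
        have htl1 : 1 ≤ tl.length := by
          have : tl.length ≠ 0 := by simpa using hne
          omega
        rw [List.drop_drop]
        rw [show i + tl.length = tl.length + i from by omega] at *
        rw [ih (tl.length + i) (acc+1) (by omega)]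
        rw [Gg_mem tl.length htl1 _ i (pairwise_PSpos s tl) hmem,
            show i + tl.length = tl.length + i from by omega]
        omega
      · rw [if_neg hp, List.tail_drop, ih (i+1) acc (by omega)]
        have hnm : i ∉ PSpos s tl := fun hmem => hp (List.mem_filter.1 hmem).2
        rw [Gg_skip tl.length _ i hnm]

theorem count_eq_Gg (s tl : List Char) (hne : tl ≠ []) :
    PySem.Chars.count s tl = Gg tl.length (PSpos s tl) 0 := by
  have := count_go_eq s tl hne s.length 0 0 (by omega)
  simpa [PySem.Chars.count, List.isEmpty_iff, hne] using this

theorem foldl_cast_Gg (k : Nat) (ps : List Nat) : ∀ (c last : Nat),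
    ((ps.map (fun (j : Nat) => (j : Int))).foldl
        (fun (st : Int × Int) j => if st.2 ≤ j then (st.1 + 1, j + (k : Int)) else st)
        ((c : Int), (last : Int))).1 = ((c + Gg k ps last : Nat) : Int) := by
  induction ps with
  | nil => intro c last; simp [Gg]
  | cons j rest ih =>
    intro c last
    rw [List.map_cons, List.foldl_cons]
    by_cases hl : last ≤ j
    · rw [if_pos (Int.ofNat_le.mpr hl)]
      have h1 : ((c : Int) + 1, (j : Int) + (k : Int)) = (((c+1 : Nat) : Int), ((j+k : Nat) : Int)) := by
        push_cast; rfl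
      rw [h1, ih (c+1) (j+k)]
      simp [Gg, hl]; omega
    · rw [if_neg (fun hc => hl (Int.ofNat_le.mp hc))]
      rw [ih c last]
      simp [Gg, hl]

theorem ps_eq (seq : String) (k : Nat) (t : String) (ht : t.toList.length = k) :
    ((PySem.List.pyRange 0 ((PySem.Str.len seq) - (k : Int) + 1) 1).foldl
        (fun d j => d.modify (PySem.Str.slice seq (some j) (some (j + (k : Int)))) [] (fun l => l ++ [j]))
        (PySem.Dict.empty : PySem.Dict String (List Int))).getD t []
      = (PSpos seq.toList t.toList).map (fun (j : Nat) => (j : Int)) := by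
  have key_eq : ∀ (j : Nat), j + k ≤ seq.toList.length →
      ((PySem.Str.slice seq (some (j : Int)) (some ((j : Int) + (k : Int)))) == t)
        = t.toList.isPrefixOf (seq.toList.drop j) := by
    intro j hj
    have hcast : ((j : Int) + (k : Int)) = ((j + k : Nat) : Int) := by push_cast; rfl
    rw [Bool.eq_iff_iff, beq_iff_eq, List.isPrefixOf_iff_prefix, ← String.toList_inj, hcast]
    rw [show (PySem.Str.slice seq (some (j:Int)) (some ((j+k : Nat) : Int))).toList
          = PySem.Chars.slice seq.toList (some (j:Int)) (some ((j+k : Nat):Int)) from PySem.Str.toList_slice ..]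
    rw [PySem.Chars.slice_eq_listSlice, PySem.List.slice_natCast]
    rw [show j + k - j = k from by omega]
    rw [List.prefix_iff_eq_take, ht]
    constructor
    · intro h; exact h.symm
    · intro h; exact h.symm
  have hfold : ∀ (js : List Int),
      ((js.foldl
        (fun d j => d.modify (PySem.Str.slice seq (some j) (some (j + (k : Int)))) [] (fun l => l ++ [j]))
        (PySem.Dict.empty : PySem.Dict String (List Int))).getD t [])
      = js.filter (fun j => PySem.Str.slice seq (some j) (some (j + (k : Int))) == t) := by
    intro js
    have hfm : ∀ (l : List Int) (d : PySem.Dict String (List Int)),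
        (l.foldl
          (fun d j => d.modify (PySem.Str.slice seq (some j) (some (j + (k : Int)))) [] (fun l => l ++ [j])) d)
        = ((l.map (fun j => (PySem.Str.slice seq (some j) (some (j + (k : Int))), j))).foldl
            (fun d p => d.modify p.1 [] (fun l => l ++ [p.2])) d) := by
      intro l
      induction l with
      | nil => intro d; rfl
      | cons x xs ih => intro d; simp only [List.foldl_cons, List.map_cons]; exact ih _
    rw [hfm]
    rw [PySem.Dict.getD_foldl_modify_append]
    simp [List.filter_map, Function.comp_def, List.map_map]
  by_cases hk : k ≤ seq.toList.length
  · have hb : (PySem.Str.len seq - (k:Int) + 1) = ((seq.toList.length - k + 1 : Nat) : Int) := by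
      simp only [PySem.Str.len]; omega
    have hrange : PySem.List.pyRange 0 (PySem.Str.len seq - (k:Int) + 1) 1
        = (List.range (seq.toList.length - k + 1)).map (fun (j : Nat) => (j : Int)) := by
      rw [hb, PySem.List.pyRange_of_pos _ _ (by norm_num : (0:Int) < 1)]
      have hpos : (0:Int) < ((seq.toList.length - k + 1 : Nat) : Int) := by positivity
      rw [if_pos hpos]
      simp
    rw [hrange, hfold, List.filter_map]
    rw [List.filter_congr (l := List.range (seq.toList.length - k + 1))
      (q := fun j => t.toList.isPrefixOf (seq.toList.drop j)) ?_]
    · simp [PSpos, ht]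
    · intro j hj
      simp only [Function.comp_apply]
      exact key_eq j (by have := List.mem_range.1 hj; omega)
  · have hb : PySem.List.pyRange 0 (PySem.Str.len seq - (k:Int) + 1) 1 = [] := by
      rw [PySem.List.pyRange_of_pos _ _ (by norm_num : (0:Int) < 1)]
      rw [if_neg (by simp only [PySem.Str.len]; omega)]
      simp
    rw [hb, hfold]
    have hnp : ¬ (t.toList <+: seq.toList) := by
      intro h
      have := h.length_le
      omega
    have : PSpos seq.toList t.toList = [] := by
      rw [PSpos, List.filter_eq_nil_iff]
      intro j hj
      have hj0 : j = 0 := by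
        have := List.mem_range.1 hj
        omega
      subst hj0
      simpa [List.isPrefixOf_iff_prefix] using hnp
    simp [this]


-- ===== final assembly =====
theorem ofList_injective : Function.Injective String.ofList := by
  intro a b h
  have := congrArg String.toList h
  simpa using this

theorem count_eq_Gg_all (seq : String) (k : Nat) (t : String) (ht : t.toList.length = k) :
    (PySem.Str.count seq t : Nat) = Gg k (PSpos seq.toList t.toList) 0 := by
  rcases Nat.eq_zero_or_pos k with hk | hk
  · subst hk
    have htl : t.toList = [] := List.length_eq_zero_iff.1 ht
    rw [PySem.Str.count_eq, htl]
    have hps : PSpos seq.toList [] = List.range (seq.toList.length + 1) := by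
      simp [PSpos, List.isPrefixOf]
    rw [hps]
    rw [Gg_all _ (List.pairwise_lt_range.imp Nat.le_of_lt) 0 (fun j _ => Nat.zero_le j)]
    simp [PySem.Chars.count]
  · have htl : t.toList ≠ [] := by
      intro h; rw [h] at ht; simp at ht; omega
    rw [PySem.Str.count_eq, count_eq_Gg seq.toList t.toList htl, ht]

theorem valB_eq (seq : String) (k : Nat) (t : String) (ht : t.toList.length = k) :
    ((((PySem.List.pyRange 0 ((PySem.Str.len seq) - (k : Int) + 1) 1).foldl
        (fun d j => d.modify (PySem.Str.slice seq (some j) (some (j + (k : Int)))) [] (fun l => l ++ [j]))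
        (PySem.Dict.empty : PySem.Dict String (List Int))).getD t []).foldl
          (fun (st : Int × Int) j => if st.2 ≤ j then (st.1 + 1, j + (k : Int)) else st) (0, 0)).1
      = ((PySem.Str.count seq t : Nat) : Int) := by
  rw [ps_eq seq k t ht]
  have h0 : ((0 : Int), (0 : Int)) = (((0:Nat) : Int), ((0:Nat) : Int)) := by norm_num
  rw [h0, foldl_cast_Gg k _ 0 0, count_eq_Gg_all seq k t ht]
  norm_num

theorem extractMotif_eq_alt (n : Int) (seq : String) (hpre : 0 ≤ n) :
    extractMotif n seq = extractMotif_alt n seq := by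
  simp only [extractMotif, extractMotif_alt]
  set k := n.toNat with hk
  have hn : n = (k : Int) := by omega
  rw [hn]
  have hnodup : ((cKeys k).map String.ofList).Nodup :=
    (nodup_cKeys k).map ofList_injective
  rw [tab_eq k, pvKeys_eq k]
  rw [PySem.Dict.items_foldl_insert_fresh _ (fun e => e) _ _
        (fun a _ => PySem.Dict.contains_empty a) (by simpa using hnodup),
      PySem.Dict.items_foldl_insert_fresh _ (fun e => e) _ _
        (fun a _ => PySem.Dict.contains_empty a) (by simpa using hnodup)]
  simp only [List.map_map]
  refine congrArg _ (List.map_congr_left ?_)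
  intro cl hcl
  have hlen : (String.ofList cl).toList.length = k := by
    simpa using length_mem_cKeys hcl
  have := valB_eq seq k (String.ofList cl) hlen
  simp only [Function.comp_apply]
  rw [this]

-- ===== VERDICT (by name: the statement is the Claim_ definition above) =====
theorem extractMotif_spec : Claim_equal_extractMotif := by
  intro n seq _ hpre
  unfold Spec_extractMotif
  exact extractMotif_eq_alt n seq hpre
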